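-- pv_equiv track=rewrite | github.com/prateekYadav07/iNeuron-python-assignments | advance4.py | vowels_added_again
-- ===== SOURCE A (Python) =====
-- def vowels_added_again(cen_string, vowels):
--     index = 0
--     output_str = ''
--     for char in cen_string:
--         if char == '*':
--             output_str += vowels[index]
--             index += 1
--         else:
--             output_str += char
--     return output_str
-- ===== SOURCE B (Python) =====
-- def vowels_added_again(cen_string, vowels):
--     parts = cen_string.split('*')
--     out = []
--     for i in range(len(parts) - 1):
--         out.append(parts[i])
--         out.append(vowels[i])
--     out.append(parts[-1])
--     return ''.join(out)
-- ===== Notes on version B (the rewrite author's own statement) =====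
-- stated objective: faster
-- what changed: B splits the string on '*' once and interleaves the segments with the vowels via a single join, instead of A's per-character scan with repeated string concatenation.
import Mathlib
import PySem

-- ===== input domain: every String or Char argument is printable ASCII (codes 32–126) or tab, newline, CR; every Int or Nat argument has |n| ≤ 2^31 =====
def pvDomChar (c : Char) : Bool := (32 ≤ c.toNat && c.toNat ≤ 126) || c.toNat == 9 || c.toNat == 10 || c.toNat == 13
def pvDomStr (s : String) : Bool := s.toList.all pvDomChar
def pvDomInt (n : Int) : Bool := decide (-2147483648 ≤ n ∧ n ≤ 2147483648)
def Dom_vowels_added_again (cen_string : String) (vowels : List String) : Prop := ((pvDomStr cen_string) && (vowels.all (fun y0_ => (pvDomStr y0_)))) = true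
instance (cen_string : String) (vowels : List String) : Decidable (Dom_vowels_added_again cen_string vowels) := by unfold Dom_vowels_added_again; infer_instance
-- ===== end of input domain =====

-- B replaces A's per-character scan with split-on-'*' and interleaving the segments with the vowels (idiomatic decomposition).


-- ===== PORT A =====
-- per-character loop; vowels[index] is PySem.List.pyGet? (none = IndexError, excluded by Pre_)
def pvGoA (vowels : List String) : List Char → Nat → List Char → List Char
  | [], _, acc => acc
  | c :: rest, idx, acc =>
    if c = '*' then
      pvGoA vowels rest (idx + 1) (acc ++ ((PySem.List.pyGet? vowels (idx : Int)).getD "").toList)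
    else
      pvGoA vowels rest idx (acc ++ [c])

def vowels_added_again (cen_string : String) (vowels : List String) : String :=
  String.ofList (pvGoA vowels cen_string.toList 0 [])

-- ===== PORT B =====
-- hand port of str.split('*') on the character list
def pvSplitStar : List Char → List (List Char)
  | [] => [[]]
  | c :: rest =>
    if c = '*' then [] :: pvSplitStar rest
    else
      match pvSplitStar rest with
      | [] => [[c]]
      | p :: ps => (c :: p) :: ps

-- interleave segments with vowels; vowels[i] via headD "" on the remaining vowels (out of range excluded by Pre_)
def pvGoB : List (List Char) → List String → List Char
  | [], _ => []
  | [p], _ => p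
  | p :: ps, vs => p ++ (vs.headD "").toList ++ pvGoB ps vs.tail

def vowels_added_again_alt (cen_string : String) (vowels : List String) : String :=
  String.ofList (pvGoB (pvSplitStar cen_string.toList) vowels)

-- ===== PRECONDITION & SPEC =====
-- Pre_ excludes exactly the inputs with more '*' than vowels, on which Python A (and B) raise IndexError.
def Pre_vowels_added_again (cen_string : String) (vowels : List String) : Prop :=
  cen_string.toList.count '*' ≤ vowels.length
instance (cen_string : String) (vowels : List String) : Decidable (Pre_vowels_added_again cen_string vowels) := by unfold Pre_vowels_added_again; infer_instance

def pvWitness_vowels_added_again : String × List String := ("c*v*n", ["o", "i"])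

def Spec_vowels_added_again (cen_string : String) (vowels : List String) (out : String) : Prop := out = vowels_added_again_alt cen_string vowels
instance (cen_string : String) (vowels : List String) (out : String) : Decidable (Spec_vowels_added_again cen_string vowels out) := by unfold Spec_vowels_added_again; infer_instance

-- ===== CLAIM (what is proved, stated in full; the proofs are below) =====
def Claim_equal_vowels_added_again : Prop := ∀ (cen_string : String) (vowels : List String), Dom_vowels_added_again cen_string vowels → Pre_vowels_added_again cen_string vowels → Spec_vowels_added_again cen_string vowels (vowels_added_again cen_string vowels)

-- ===== LEMMAS AND PROOFS =====
theorem pvSplitStar_ne_nil (cs : List Char) : pvSplitStar cs ≠ [] := by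
  cases cs with
  | nil => simp [pvSplitStar]
  | cons c rest =>
    simp only [pvSplitStar]
    split
    · simp
    · cases h : pvSplitStar rest <;> simp

theorem pvGoB_cons (c : Char) (p : List Char) (ps : List (List Char)) (vs : List String) :
    pvGoB ((c :: p) :: ps) vs = c :: pvGoB (p :: ps) vs := by
  cases ps with
  | nil => simp [pvGoB]
  | cons q qs => simp [pvGoB]

theorem pvGoA_eq (vowels : List String) (cs : List Char) :
    ∀ (n : Nat) (acc : List Char),
      pvGoA vowels cs n acc = acc ++ pvGoB (pvSplitStar cs) (vowels.drop n) := by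
  induction cs with
  | nil => intro n acc; simp [pvGoA, pvSplitStar, pvGoB]
  | cons c rest ih =>
    intro n acc
    by_cases hc : c = '*'
    · subst hc
      rw [show pvGoA vowels ('*' :: rest) n acc
            = pvGoA vowels rest (n + 1)
                (acc ++ ((PySem.List.pyGet? vowels (n : Int)).getD "").toList) from by
        simp [pvGoA]]
      rw [ih (n + 1)]
      cases h : pvSplitStar rest with
      | nil => exact absurd h (pvSplitStar_ne_nil rest)
      | cons p ps =>
        rw [show pvSplitStar ('*' :: rest) = [] :: p :: ps from by simp [pvSplitStar, h]]
        simp only [pvGoB, List.tail_drop, List.nil_append, List.append_assoc]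
        rw [List.headD_eq_head?, List.head?_drop]
        simp [PySem.List.pyGet?_natCast]
    · rw [show pvGoA vowels (c :: rest) n acc = pvGoA vowels rest n (acc ++ [c]) from by
        simp [pvGoA, hc]]
      rw [ih n]
      cases h : pvSplitStar rest with
      | nil => exact absurd h (pvSplitStar_ne_nil rest)
      | cons p ps =>
        rw [show pvSplitStar (c :: rest) = (c :: p) :: ps from by simp [pvSplitStar, hc, h]]
        rw [pvGoB_cons]
        simp

-- ===== VERDICT (by name: the statement is the Claim_ definition above) =====
theorem vowels_added_again_spec : Claim_equal_vowels_added_again := by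
  intro cen_string vowels _ _
  unfold Spec_vowels_added_again vowels_added_again vowels_added_again_alt
  rw [pvGoA_eq]
  simp
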